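-- pv_equiv track=rewrite | github.com/shiyanlou-015555/NLP | 1/lesson1/pattern_match.py | segment_match
-- ===== SOURCE A (Python) =====
-- def segment_match(pattern:list,saying:list):
--     seg_pat,rest = pattern[0],pattern[1:]
--     seg_pat = seg_pat.replace('?*','?')
--     if not rest: return (seg_pat,saying),len(saying)#假如没有剩余的直接返回长度
--     for i,token in enumerate(saying):
--         if rest[0]== token and is_match(rest[1:],saying[(i+1):]):#知道*？遍历完了，并且和saying进行比较成功，说明*？后面的都是相同的
--             return (seg_pat,saying[:i]),i
--     return (seg_pat,saying),len(saying)
--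
-- def is_match(rest,saying):
--     if not rest and not saying:
--         return  True
--     if not all(a.isalpha() for a in rest[0]):#判断每一位字符都是字母
--         return True
--     if rest[0]!= saying[0]:
--         return False
--     return is_match(rest[1:],saying[1:])
-- ===== SOURCE B (Python) =====
-- def segment_match(pattern: list, saying: list):
--     seg_pat = pattern[0].replace('?*', '?')
--     rest = pattern[1:]
--     if not rest:
--         return (seg_pat, saying), len(saying)
--     idx = next((i for i, token in enumerate(saying)
--                 if token == rest[0] and is_match(rest[1:], saying[i + 1:])), None)
--     if idx is None:
--         return (seg_pat, saying), len(saying)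
--     return (seg_pat, saying[:idx]), idx
--
--
-- def is_match(rest, saying):
--     i = 0
--     while True:
--         if i >= len(rest) and i >= len(saying):
--             return True
--         if not all(c.isalpha() for c in rest[i]):
--             return True
--         if rest[i] != saying[i]:
--             return False
--         i += 1
-- ===== Notes on version B (the rewrite author's own statement) =====
-- stated objective: alternative
-- what changed: is_match is rewritten from recursion on list tails to an iterative while-loop walking a single index into both lists, and the scan over saying becomes a first-matching-index search (next over enumerate) whose result is then turned into the return value.
import Mathlib
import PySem

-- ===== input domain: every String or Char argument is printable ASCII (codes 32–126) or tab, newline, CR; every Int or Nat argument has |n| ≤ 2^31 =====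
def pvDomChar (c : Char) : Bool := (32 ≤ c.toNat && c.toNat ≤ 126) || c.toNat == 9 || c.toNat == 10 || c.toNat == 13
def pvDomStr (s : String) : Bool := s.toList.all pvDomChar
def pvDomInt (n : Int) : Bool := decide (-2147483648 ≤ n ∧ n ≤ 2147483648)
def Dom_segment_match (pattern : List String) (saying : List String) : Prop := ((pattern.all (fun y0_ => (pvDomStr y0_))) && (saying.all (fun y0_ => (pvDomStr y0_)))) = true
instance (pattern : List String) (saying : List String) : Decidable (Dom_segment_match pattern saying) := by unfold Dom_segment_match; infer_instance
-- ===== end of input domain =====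

-- B rewrites the recursive is_match as an iterative index loop and the scan as a first-index
-- search (objective: alternative decomposition, same cost).

-- ===== PORT A =====

-- all(a.isalpha() for a in tok): per-character isalpha, vacuously true on ""
def pvAllAlpha (tok : String) : Bool := tok.toList.all PySem.Chars.isalpha

-- recursive is_match, exactly A's branch order; `false` marks Python's IndexErrors
-- (rest exhausted with saying nonempty; saying exhausted after the alpha check) — excluded by Pre_
def isMatchA : List String → List String → Bool
  | [], [] => true
  | [], _ :: _ => false        -- Python raises IndexError on rest[0]
  | r :: rs, saying =>
    if !(pvAllAlpha r) then true
    else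
      match saying with
      | [] => false            -- Python raises IndexError on saying[0]
      | s :: ss => if r != s then false else isMatchA rs ss

-- the for-loop over enumerate(saying); saying[:i] / saying[i+1:] ported as take/drop,
-- exact for these in-range nonnegative indices
def scanA (seg r0 : String) (rs : List String) (saying : List String) (i : Nat) :
    (String × List String) × Int :=
  if h : i < saying.length then
    if r0 == saying[i] && isMatchA rs (saying.drop (i + 1)) then
      ((seg, saying.take i), (i : Int))
    else scanA seg r0 rs saying (i + 1)
  else ((seg, saying), (saying.length : Int))
termination_by saying.length - i

def segment_match (pattern : List String) (saying : List String) : (String × List String) × Int :=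
  match pattern with
  | [] => (("", []), 0)        -- Python raises IndexError on pattern[0]; excluded by Pre_
  | p :: rest =>
    let seg_pat := PySem.Str.replace p "?*" "?"
    match rest with
    | [] => ((seg_pat, saying), (saying.length : Int))
    | r0 :: rs => scanA seg_pat r0 rs saying 0

-- ===== PORT B =====

-- iterative is_match: an index i into both lists; `false` marks the same IndexErrors
def isMatchBgo (rest saying : List String) (i : Nat) : Bool :=
  if i ≥ rest.length ∧ i ≥ saying.length then true
  else
    match PySem.List.pyGet? rest (i : Int) with
    | none => false            -- Python raises IndexError on rest[i]
    | some r =>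
      if !(r.toList.all PySem.Chars.isalpha) then true
      else
        match PySem.List.pyGet? saying (i : Int) with
        | none => false        -- Python raises IndexError on saying[i]
        | some s => if r != s then false else isMatchBgo rest saying (i + 1)
termination_by rest.length + saying.length - i
decreasing_by omega

def isMatchB (rest saying : List String) : Bool := isMatchBgo rest saying 0

-- next((i for i, token in enumerate(saying) if …), None): first index satisfying the predicate
def findIdxB (p : Nat → String → Bool) : List String → Nat → Option Nat
  | [], _ => none
  | t :: ts, i => if p i t then some i else findIdxB p ts (i + 1)

def segment_match_alt (pattern : List String) (saying : List String) : (String × List String) × Int :=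
  match pattern with
  | [] => (("", []), 0)        -- Python raises IndexError on pattern[0]; excluded by Pre_
  | p :: rest =>
    let seg_pat := PySem.Str.replace p "?*" "?"
    match rest with
    | [] => ((seg_pat, saying), (saying.length : Int))
    | r0 :: rs =>
      match findIdxB (fun i token => token == r0 && isMatchB rs (saying.drop (i + 1))) saying 0 with
      | none => ((seg_pat, saying), (saying.length : Int))
      | some idx => ((seg_pat, saying.take idx), (idx : Int))

-- ===== PRECONDITION & SPEC =====

-- is_match(rs, say) raises IndexError exactly when one list runs out while the tokens so far
-- were all-alphabetic and pairwise equal (and, if say is the shorter one, the next rs token is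
-- alphabetic too).
def pvRaisesIM (rs say : List String) : Bool :=
  ((List.zip rs say).all (fun ab => pvAllAlpha ab.1 && ab.1 == ab.2)) &&
    (decide (rs.length < say.length) ||
     (decide (say.length < rs.length) && pvAllAlpha (rs.getD say.length "")))

-- is_match(rs, say) returns True exactly when some prefix of length k is all-alphabetic and
-- pairwise equal and either both lists end at k or rs[k] exists and is not all-alphabetic.
def pvIsTrueIM (rs say : List String) : Bool :=
  (List.range (rs.length + 1)).any (fun k =>
    decide (k ≤ say.length) &&
    ((List.range k).all (fun j => pvAllAlpha (rs.getD j "") && (rs.getD j "" == say.getD j ""))) &&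
    ((decide (k = rs.length) && decide (k = say.length)) ||
     (decide (k < rs.length) && !pvAllAlpha (rs.getD k ""))))

def pvPreB (pattern saying : List String) : Bool :=
  match pattern with
  | [] => false
  | _ :: [] => true
  | _ :: r0 :: rs =>
    (List.range saying.length).all
      (fun i => !(saying.getD i "" == r0 && pvRaisesIM rs (saying.drop (i + 1))) ||
        (List.range i).any (fun j => saying.getD j "" == r0 && pvIsTrueIM rs (saying.drop (j + 1))))

-- Pre_ excludes exactly the inputs on which A raises IndexError: the empty pattern (pattern[0]),
-- and the inputs where the for-loop reaches a matching position that drives is_match into an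
-- IndexError before any earlier matching position returned True.
def Pre_segment_match (pattern : List String) (saying : List String) : Prop :=
  pvPreB pattern saying = true
instance (pattern : List String) (saying : List String) : Decidable (Pre_segment_match pattern saying) := by unfold Pre_segment_match; infer_instance

def pvWitness_segment_match : List String × List String := (["?*x", "hello"], ["hi", "hello"])

def Spec_segment_match (pattern : List String) (saying : List String) (out : (String × List String) × Int) : Prop := out = segment_match_alt pattern saying
instance (pattern : List String) (saying : List String) (out : (String × List String) × Int) : Decidable (Spec_segment_match pattern saying out) := by unfold Spec_segment_match; infer_instance

-- ===== CLAIM (what is proved, stated in full; the proofs are below) =====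
def Claim_equal_segment_match : Prop := ∀ (pattern : List String) (saying : List String), Dom_segment_match pattern saying → Pre_segment_match pattern saying → Spec_segment_match pattern saying (segment_match pattern saying)

-- ===== LEMMAS AND PROOFS =====

theorem isMatchBgo_eq_isMatchA (rest saying : List String) (i : Nat) :
    isMatchBgo rest saying i = isMatchA (rest.drop i) (saying.drop i) := by
  induction i using isMatchBgo.induct rest saying with
  | case1 x h =>
    rw [isMatchBgo]
    rw [if_pos h, List.drop_eq_nil_of_le h.1, List.drop_eq_nil_of_le h.2, isMatchA]
  | case2 x h hget =>
    rw [isMatchBgo]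
    simp only [if_neg h, hget]
    simp only [PySem.List.pyGet?_natCast, List.getElem?_eq_none_iff] at hget
    rw [List.drop_eq_nil_of_le hget]
    have hx : x < saying.length := by omega
    rw [List.drop_eq_getElem_cons hx, isMatchA]
  | case3 x h r hget halpha =>
    rw [isMatchBgo]
    simp only [if_neg h, hget, if_pos halpha]
    simp only [PySem.List.pyGet?_natCast] at hget
    have hi : x < rest.length := (List.getElem?_eq_some_iff.mp hget).1
    have hr : rest[x] = r := by rw [List.getElem?_eq_getElem hi] at hget; exact Option.some.inj hget
    rw [List.drop_eq_getElem_cons hi]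
    cases hd : saying.drop x with
    | nil => simp [isMatchA, hr, pvAllAlpha, halpha]
    | cons a as => simp [isMatchA, hr, pvAllAlpha, halpha]
  | case4 x h r hget halpha hsget =>
    rw [isMatchBgo]
    simp only [if_neg h, hget, if_neg halpha, hsget]
    simp only [PySem.List.pyGet?_natCast] at hget hsget
    have hi : x < rest.length := (List.getElem?_eq_some_iff.mp hget).1
    have hr : rest[x] = r := by rw [List.getElem?_eq_getElem hi] at hget; exact Option.some.inj hget
    rw [List.drop_eq_getElem_cons hi,
        List.drop_eq_nil_of_le (List.getElem?_eq_none_iff.mp hsget)]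
    simp only [Bool.not_eq_true', Bool.not_eq_false] at halpha
    simp [isMatchA, hr, pvAllAlpha, halpha]
  | case5 x h r hget halpha s hsget hne =>
    rw [isMatchBgo]
    simp only [if_neg h, hget, if_neg halpha, hsget, if_pos hne]
    simp only [PySem.List.pyGet?_natCast] at hget hsget
    have hi : x < rest.length := (List.getElem?_eq_some_iff.mp hget).1
    have hsi : x < saying.length := (List.getElem?_eq_some_iff.mp hsget).1
    have hr : rest[x] = r := by rw [List.getElem?_eq_getElem hi] at hget; exact Option.some.inj hget
    have hs : saying[x] = s := by rw [List.getElem?_eq_getElem hsi] at hsget; exact Option.some.inj hsget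
    simp only [Bool.not_eq_true', Bool.not_eq_false] at halpha
    rw [List.drop_eq_getElem_cons hi, List.drop_eq_getElem_cons hsi]
    simp [isMatchA, hr, hs, pvAllAlpha, halpha, hne]
  | case6 x h r hget halpha s hsget hne ih =>
    rw [isMatchBgo]
    simp only [if_neg h, hget, if_neg halpha, hsget, if_neg hne]
    simp only [PySem.List.pyGet?_natCast] at hget hsget
    have hi : x < rest.length := (List.getElem?_eq_some_iff.mp hget).1
    have hsi : x < saying.length := (List.getElem?_eq_some_iff.mp hsget).1
    have hr : rest[x] = r := by rw [List.getElem?_eq_getElem hi] at hget; exact Option.some.inj hget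
    have hs : saying[x] = s := by rw [List.getElem?_eq_getElem hsi] at hsget; exact Option.some.inj hsget
    simp only [Bool.not_eq_true', Bool.not_eq_false] at halpha
    simp only [Bool.not_eq_true, bne_eq_false_iff_eq] at hne
    rw [List.drop_eq_getElem_cons hi, List.drop_eq_getElem_cons hsi]
    simp [isMatchA, hr, hs, pvAllAlpha, hne, ih]
    intro c hc hfalse
    rw [hne] at halpha
    have hcl := List.all_eq_true.mp halpha c hc
    exact absurd hcl (by simp [hfalse])

theorem scanA_eq_find (seg r0 : String) (rs saying : List String) (i : Nat) :
    scanA seg r0 rs saying i =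
      match findIdxB (fun j token => token == r0 && isMatchB rs (saying.drop (j + 1)))
          (saying.drop i) i with
      | none => ((seg, saying), (saying.length : Int))
      | some idx => ((seg, saying.take idx), (idx : Int)) := by
  induction i using scanA.induct r0 rs saying with
  | case1 x h hcond =>
    rw [scanA]
    rw [dif_pos h, if_pos hcond, List.drop_eq_getElem_cons h, findIdxB]
    have : (saying[x] == r0 && isMatchB rs (saying.drop (x + 1))) = true := by
      rcases Bool.and_eq_true_iff.mp hcond with ⟨h1, h2⟩
      rw [isMatchB, isMatchBgo_eq_isMatchA]
      simp only [List.drop_zero]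
      refine Bool.and_eq_true_iff.mpr ⟨?_, h2⟩
      rwa [BEq.comm]
    rw [this]
    simp
  | case2 x h hcond ih =>
    rw [scanA]
    rw [dif_pos h, if_neg hcond, ih, List.drop_eq_getElem_cons h, findIdxB]
    have : (saying[x] == r0 && isMatchB rs (saying.drop (x + 1))) = false := by
      rw [isMatchB, isMatchBgo_eq_isMatchA]
      simp only [List.drop_zero]
      cases hb : (saying[x] == r0 && isMatchA rs (saying.drop (x + 1))) with
      | false => rfl
      | true =>
        rcases Bool.and_eq_true_iff.mp hb with ⟨h1, h2⟩
        rw [BEq.comm] at h1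
        exact absurd (Bool.and_eq_true_iff.mpr ⟨h1, h2⟩) (by simpa using hcond)
    rw [this]
    simp
  | case3 x h =>
    rw [scanA]
    rw [dif_neg h, List.drop_eq_nil_of_le (by omega), findIdxB]

-- ===== VERDICT (by name: the statement is the Claim_ definition above) =====
theorem segment_match_spec : Claim_equal_segment_match := by
  intro pattern saying _ _
  unfold Spec_segment_match
  match pattern with
  | [] => rfl
  | p :: [] => rfl
  | p :: r0 :: rs =>
    show scanA _ r0 rs saying 0 = _
    rw [scanA_eq_find]
    simp only [List.drop_zero]
    rfl
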